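-- pv_equiv track=rewrite | github.com/cam4ani/UTILS | utils.py | lists_remove_in1
-- ===== SOURCE A (Python) =====
-- def lists_remove_in1(li1,li2,s):
--     #remove s until no more s
--     if s in li1:
--         ind = li1.index(s)
--         del li1[ind]
--         del li2[ind]
--         return(lists_remove_in1(li1,li2,s))
--     else:
--         return(li1,li2)
-- ===== SOURCE B (Python) =====
-- def lists_remove_in1(li1, li2, s):
--     # one pass: keep non-s elements of li1 and their partners in li2 (plus li2's unpaired tail);
--     # results are written back in place so the caller's lists are mutated like A mutates them.
--     out1 = [x for x in li1 if x != s]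
--     out2 = [y for x, y in zip(li1, li2) if x != s] + li2[len(li1):]
--     li1[:] = out1
--     li2[:] = out2
--     return (li1, li2)
-- ===== Notes on version B (the rewrite author's own statement) =====
-- stated objective: idiomatic
-- what changed: Replaces A's recursion of repeated li1.index(s) scans and paired del operations with a single pass that filters li1 and zip(li1,li2) and appends li2's unpaired tail, written back in place.
import Mathlib
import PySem

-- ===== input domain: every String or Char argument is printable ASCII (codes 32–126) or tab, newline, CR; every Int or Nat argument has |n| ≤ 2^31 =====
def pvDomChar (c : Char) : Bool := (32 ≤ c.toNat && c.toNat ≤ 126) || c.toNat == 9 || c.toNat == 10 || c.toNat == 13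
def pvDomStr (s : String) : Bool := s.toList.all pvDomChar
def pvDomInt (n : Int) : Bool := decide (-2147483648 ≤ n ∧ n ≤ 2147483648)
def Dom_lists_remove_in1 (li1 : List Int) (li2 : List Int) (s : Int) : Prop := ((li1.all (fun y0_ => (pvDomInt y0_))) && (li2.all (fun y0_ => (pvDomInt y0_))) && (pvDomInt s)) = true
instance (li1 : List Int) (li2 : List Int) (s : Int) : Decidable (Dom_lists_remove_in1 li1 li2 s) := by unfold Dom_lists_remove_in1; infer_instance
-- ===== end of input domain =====

-- B replaces A's repeated index-and-delete recursion by one filtering pass (return value and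
-- in-place effect agree on Pre_; only the return value is proved here).


-- ===== PORT A =====
-- `del li2[ind]` raises IndexError when ind ≥ len li2; there eraseIdx is a no-op, and exactly
-- those inputs are excluded by Pre_ below.
def lists_remove_in1 (li1 : List Int) (li2 : List Int) (s : Int) : List Int × List Int :=
  if _h : s ∈ li1 then
    let ind := li1.idxOf s        -- li1.index(s); total here since the guard gives s ∈ li1
    lists_remove_in1 (li1.eraseIdx ind) (li2.eraseIdx ind) s
  else (li1, li2)
termination_by li1.length
decreasing_by
  have h1 := List.idxOf_lt_length_of_mem _h
  rw [List.length_eraseIdx_of_lt h1]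
  omega

-- ===== PORT B =====
-- [x for x in li1 if x != s];  [y for x,y in zip(li1,li2) if x != s] + li2[len(li1):]
-- (li2[len(li1):] with the nonnegative index len(li1) is List.drop li1.length li2)
def lists_remove_in1_alt (li1 : List Int) (li2 : List Int) (s : Int) : List Int × List Int :=
  (li1.filter (fun x => x ≠ s),
   ((li1.zip li2).filter (fun p => p.1 ≠ s)).map Prod.snd ++ li2.drop li1.length)

-- ===== PRECONDITION & SPEC =====
-- Pre_ excludes exactly the inputs on which A raises IndexError (some occurrence of s in li1
-- at an index ≥ len li2, so `del li2[ind]` is out of range).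
def Pre_lists_remove_in1 (li1 : List Int) (li2 : List Int) (s : Int) : Prop :=
  ∀ i < li1.length, li1.getD i 0 = s → i < li2.length
instance (li1 : List Int) (li2 : List Int) (s : Int) : Decidable (Pre_lists_remove_in1 li1 li2 s) := by unfold Pre_lists_remove_in1; infer_instance

def pvWitness_lists_remove_in1 : List Int × List Int × Int := ([1, 2, 1], [5, 6, 7], 1)

def Spec_lists_remove_in1 (li1 : List Int) (li2 : List Int) (s : Int) (out : List Int × List Int) : Prop := out = lists_remove_in1_alt li1 li2 s
instance (li1 : List Int) (li2 : List Int) (s : Int) (out : List Int × List Int) : Decidable (Spec_lists_remove_in1 li1 li2 s out) := by unfold Spec_lists_remove_in1; infer_instance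

-- ===== CLAIM (what is proved, stated in full; the proofs are below) =====
def Claim_equal_lists_remove_in1 : Prop := ∀ (li1 : List Int) (li2 : List Int) (s : Int), Dom_lists_remove_in1 li1 li2 s → Pre_lists_remove_in1 li1 li2 s → Spec_lists_remove_in1 li1 li2 s (lists_remove_in1 li1 li2 s)

-- ===== LEMMAS AND PROOFS =====

-- A step on a cons with head ≠ s prepends the heads to the result on the tails.
theorem lists_remove_in1_cons (s x y : Int) :
    ∀ n (t t2 : List Int), t.length ≤ n → x ≠ s →
      lists_remove_in1 (x :: t) (y :: t2) s
        = (x :: (lists_remove_in1 t t2 s).1, y :: (lists_remove_in1 t t2 s).2) := by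
  intro n
  induction n with
  | zero =>
    intro t t2 hlen hx
    have ht : t = [] := List.length_eq_zero_iff.mp (Nat.le_zero.mp hlen)
    subst ht
    conv_lhs => rw [lists_remove_in1.eq_def]
    conv_rhs => rw [lists_remove_in1.eq_def]
    simp [Ne.symm hx]
  | succ n ih =>
    intro t t2 hlen hx
    by_cases hmem : s ∈ t
    · have hidx := List.idxOf_lt_length_of_mem hmem
      conv_lhs => rw [lists_remove_in1.eq_def]
      have hmem' : s ∈ x :: t := List.mem_cons_of_mem _ hmem
      rw [dif_pos hmem']
      have hio : (x :: t).idxOf s = t.idxOf s + 1 := by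
        simp [hx]
      rw [hio]
      simp only [List.eraseIdx_cons_succ]
      have hlen' : (t.eraseIdx (t.idxOf s)).length ≤ n := by
        rw [List.length_eraseIdx_of_lt hidx]; omega
      rw [ih _ _ hlen' hx]
      conv_rhs => rw [lists_remove_in1.eq_def]
      rw [dif_pos hmem]
    · have : s ∉ x :: t := by
        intro h; rcases List.mem_cons.mp h with h | h
        · exact hx h.symm
        · exact hmem h
      conv_lhs => rw [lists_remove_in1.eq_def]
      conv_rhs => rw [lists_remove_in1.eq_def]
      rw [dif_neg this, dif_neg hmem]

-- The main agreement lemma, by structural induction on li1 generalizing li2.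
theorem lists_remove_in1_agree (s : Int) :
    ∀ (li1 li2 : List Int), Pre_lists_remove_in1 li1 li2 s →
      lists_remove_in1 li1 li2 s = lists_remove_in1_alt li1 li2 s := by
  intro li1
  induction li1 with
  | nil =>
    intro li2 _
    rw [lists_remove_in1.eq_def]
    simp [lists_remove_in1_alt]
  | cons x t ih =>
    intro li2 hpre
    by_cases hx : x = s
    · subst hx
      have h0 : 0 < li2.length := hpre 0 (by simp) (by simp)
      obtain ⟨y, t2, rfl⟩ : ∃ y t2, li2 = y :: t2 := by
        cases li2 with
        | nil => simp at h0
        | cons y t2 => exact ⟨y, t2, rfl⟩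
      rw [lists_remove_in1.eq_def]
      rw [dif_pos (List.mem_cons_self)]
      have hio : (x :: t).idxOf x = 0 := by simp
      rw [hio]
      simp only [List.eraseIdx_cons_zero]
      have hpre' : Pre_lists_remove_in1 t t2 x := by
        intro i hi hg
        have := hpre (i + 1) (by simp; omega) (by simpa using hg)
        simpa using this
      rw [ih t2 hpre']
      simp [lists_remove_in1_alt]
    · cases li2 with
      | nil =>
        have hsnot : s ∉ (x :: t) := by
          intro h; rcases List.mem_cons.mp h with h | h
          · exact hx h.symm
          · obtain ⟨i, hi, hg⟩ := List.getElem_of_mem h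
            have := hpre (i + 1) (by simp; omega) (by simp [List.getD, hi, hg])
            simp at this
        rw [lists_remove_in1.eq_def, dif_neg hsnot]
        have hall : ∀ a ∈ x :: t, a ≠ s := fun a ha he => hsnot (he ▸ ha)
        simp [lists_remove_in1_alt]
        exact (List.filter_eq_self.mpr (fun a ha => by simp [hall a ha])).symm
      | cons y t2 =>
        have hpre' : Pre_lists_remove_in1 t t2 s := by
          intro i hi hg
          have := hpre (i + 1) (by simp; omega) (by simpa using hg)
          simpa using this
        rw [lists_remove_in1_cons s x y t.length t t2 le_rfl hx, ih t2 hpre']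
        simp [lists_remove_in1_alt, hx]

-- ===== VERDICT (by name: the statement is the Claim_ definition above) =====
theorem lists_remove_in1_spec : Claim_equal_lists_remove_in1 := by
  intro li1 li2 s _ hpre
  unfold Spec_lists_remove_in1
  exact lists_remove_in1_agree s li1 li2 hpre
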